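-- pv_equiv track=rewrite | github.com/MikhailMinsk/Python_projects | Codewars/morse_decode_2.py | morse_bits
-- ===== SOURCE A (Python) =====
-- def morse_bits(bits):
--     bits = bits.lstrip('0').rstrip('0')
--     n = min([len(i) for i in bits.split('1') + bits.split('0') if i])
--     return bits.replace('111' * n, '-') \
--         .replace('1' * n, '.') \
--         .replace('0000000' * n, '  ') \
--         .replace('000' * n, ' ') \
--         .replace('0' * n, '') \
--         .split(' ')
-- ===== SOURCE B (Python) =====
-- def morse_bits(bits):
--     s = bits.strip('0')
--     n = min(len(p) for p in s.split('1') + s.split('0') if p)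
--     # single left-to-right pass with a replacement table, longest/highest-priority pattern first
--     table = [('1' * (3 * n), '-'), ('1' * n, '.'),
--              ('0' * (7 * n), '  '), ('0' * (3 * n), ' '), ('0' * n, '')]
--     out = []
--     i = 0
--     while i < len(s):
--         for pat, rep in table:
--             if s.startswith(pat, i):
--                 out.append(rep)
--                 i += len(pat)
--                 break
--         else:
--             out.append(s[i])
--             i += 1
--     return ''.join(out).split(' ')
-- ===== Notes on version B (the rewrite author's own statement) =====
-- stated objective: alternative
-- what changed: B strips the zeros and then decodes in one left-to-right scan with a priority replacement table ('1'*3n->'-', '1'*n->'.', '0'*7n->' ', '0'*3n->' ', '0'*n->'', unmatched char copied), instead of A's five sequential whole-string replace passes; Pre_ excludes strings with no character other than '0', on which A's min([]) raises ValueError (B raises the same).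
-- outside the precondition, e.g. on morse_bits('0'): A raises ValueError, B raises ValueError; on morse_bits(''): A raises ValueError, B raises ValueError
import Mathlib
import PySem

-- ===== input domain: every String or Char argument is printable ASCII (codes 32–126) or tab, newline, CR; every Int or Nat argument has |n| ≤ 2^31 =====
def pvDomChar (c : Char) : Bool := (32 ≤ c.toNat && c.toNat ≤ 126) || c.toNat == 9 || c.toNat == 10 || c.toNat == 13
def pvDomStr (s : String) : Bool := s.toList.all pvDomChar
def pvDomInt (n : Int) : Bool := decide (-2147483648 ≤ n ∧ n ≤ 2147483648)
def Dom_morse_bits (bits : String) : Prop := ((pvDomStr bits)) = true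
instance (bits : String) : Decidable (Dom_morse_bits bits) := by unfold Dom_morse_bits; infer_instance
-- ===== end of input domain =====

-- B decodes the bit-stream in ONE left-to-right scan with a priority replacement table
-- instead of A's five sequential whole-string replace passes; same return value on Pre_ (alternative decomposition).


-- ===== PORT A =====
-- Python str.lstrip('0') / str.rstrip('0') (single-char strip set), ported by hand: exact
def pvLstrip0 (s : List Char) : List Char := s.dropWhile (fun c => c == '0')
def pvRstrip0 (s : List Char) : List Char := (s.reverse.dropWhile (fun c => c == '0')).reverse

def morse_bits (bits : String) : List String :=
  let b := pvRstrip0 (pvLstrip0 bits.toList)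
  let lens := ((PySem.Chars.splitOn b ['1'] ++ PySem.Chars.splitOn b ['0']).filter
      (fun i => !i.isEmpty)).map List.length
  match PySem.List.min? lens (fun x => x) with
  | none => []    -- Python: min([]) raises ValueError; excluded by Pre_
  | some n =>
      (PySem.Chars.splitOn
        (PySem.Chars.replace
          (PySem.Chars.replace
            (PySem.Chars.replace
              (PySem.Chars.replace
                (PySem.Chars.replace b (PySem.List.pyRepeat ['1','1','1'] (n : Int)) ['-'])
                (PySem.List.pyRepeat ['1'] (n : Int)) ['.'])
              (PySem.List.pyRepeat ['0','0','0','0','0','0','0'] (n : Int)) [' ',' '])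
            (PySem.List.pyRepeat ['0','0','0'] (n : Int)) [' '])
          (PySem.List.pyRepeat ['0'] (n : Int)) [])
        [' ']).map (fun p => String.mk p)

-- ===== PORT B =====
-- B's while loop over index i, with the 5-entry replacement table tried in order at each position;
-- ported as fuel recursion on the remaining suffix (fuel = length; Python's i advances by ≥ 1 per step
-- since every pattern is nonempty, so the fuel never runs out on reachable calls). The pieces appended
-- to `out` are emitted directly into the result list (''.join of the appends).
def pvScanGo (n : Nat) : Nat → List Char → List Char
  | 0, _ => []
  | _ + 1, [] => []
  | f + 1, c :: t =>
      if (List.replicate (3 * n) '1').isPrefixOf (c :: t) then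
        '-' :: pvScanGo n f ((c :: t).drop (3 * n))
      else if (List.replicate n '1').isPrefixOf (c :: t) then
        '.' :: pvScanGo n f ((c :: t).drop n)
      else if (List.replicate (7 * n) '0').isPrefixOf (c :: t) then
        ' ' :: ' ' :: pvScanGo n f ((c :: t).drop (7 * n))
      else if (List.replicate (3 * n) '0').isPrefixOf (c :: t) then
        ' ' :: pvScanGo n f ((c :: t).drop (3 * n))
      else if (List.replicate n '0').isPrefixOf (c :: t) then
        pvScanGo n f ((c :: t).drop n)
      else c :: pvScanGo n f t

def morse_bits_alt (bits : String) : List String :=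
  let s := PySem.Chars.stripChars bits.toList ['0']
  let lens := ((PySem.Chars.splitOn s ['1'] ++ PySem.Chars.splitOn s ['0']).filter
      (fun i => !i.isEmpty)).map List.length
  match PySem.List.min? lens (fun x => x) with
  | none => []    -- Python: min(empty generator) raises ValueError; excluded by Pre_
  | some n =>
      (PySem.Chars.splitOn (pvScanGo n s.length s) [' ']).map (fun p => String.mk p)

-- ===== PRECONDITION & SPEC =====
-- Pre_ excludes exactly the inputs whose characters are all '0' (or the empty string): there A's min([]) raises ValueError.
def Pre_morse_bits (bits : String) : Prop := bits.toList.any (fun c => decide (c ≠ '0')) = true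
instance (bits : String) : Decidable (Pre_morse_bits bits) := by unfold Pre_morse_bits; infer_instance
def pvWitness_morse_bits : String := "1"

def Spec_morse_bits (bits : String) (out : List String) : Prop := out = morse_bits_alt bits
instance (bits : String) (out : List String) : Decidable (Spec_morse_bits bits out) := by
  unfold Spec_morse_bits; infer_instance

-- ===== CLAIM (what is proved, stated in full; the proofs are below) =====
def Claim_equal_morse_bits : Prop :=
  ∀ (bits : String), Dom_morse_bits bits → Pre_morse_bits bits → Spec_morse_bits bits (morse_bits bits)

-- ===== LEMMAS AND PROOFS =====

-- the greedy non-overlapping left-to-right replacement (what Python str.replace does), pattern c :: cs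
def pvGreedy (c : Char) (cs new : List Char) : List Char → List Char
  | [] => []
  | a :: t =>
      if (c :: cs).isPrefixOf (a :: t) then new ++ pvGreedy c cs new (t.drop cs.length)
      else a :: pvGreedy c cs new t
  termination_by l => l.length
  decreasing_by
  · simp only [List.length_drop, List.length_cons]; omega
  · simp only [List.length_cons]; omega

-- pvG e k new = replace with the homogeneous pattern (replicate k e), k ≥ 1
def pvG (e : Char) (k : Nat) (new : List Char) (l : List Char) : List Char :=
  pvGreedy e (List.replicate (k - 1) e) new l

lemma pvGo_eq (c : Char) (cs new : List Char) :
    ∀ (fuel : Nat) (l acc : List Char), l.length ≤ fuel →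
      PySem.Chars.replace.go (c :: cs) new fuel l acc = acc.reverse ++ pvGreedy c cs new l := by
  intro fuel
  induction fuel with
  | zero =>
      intro l acc h
      have hl : l = [] := by cases l <;> simp_all
      subst hl
      simp [PySem.Chars.replace.go, pvGreedy]
  | succ f ih =>
      intro l acc h
      cases l with
      | nil => simp [PySem.Chars.replace.go, pvGreedy]
      | cons a t =>
          rw [PySem.Chars.replace.go, pvGreedy]
          by_cases hp : (c :: cs).isPrefixOf (a :: t) = true
          · simp only [hp, if_true, List.length_cons, List.drop_succ_cons]
            rw [ih (t.drop cs.length) (new.reverse ++ acc)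
              (by simp only [List.length_drop]; simp only [List.length_cons] at h; omega)]
            simp
          · simp only [hp, if_false, Bool.false_eq_true]
            rw [ih t (a :: acc) (by simp only [List.length_cons] at h; omega)]
            simp

lemma pvReplace_eq (c : Char) (cs new s : List Char) :
    PySem.Chars.replace s (c :: cs) new = pvGreedy c cs new s := by
  simp only [PySem.Chars.replace, List.isEmpty_cons, Bool.false_eq_true, if_false]
  simpa using pvGo_eq c cs new s.length s [] le_rfl

lemma pvReplace_G (e : Char) (k : Nat) (new s : List Char) (hk : 1 ≤ k) :
    PySem.Chars.replace s (List.replicate k e) new = pvG e k new s := by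
  obtain ⟨k', rfl⟩ : ∃ k', k = k' + 1 := ⟨k - 1, by omega⟩
  rw [List.replicate_succ, pvReplace_eq]
  rfl

lemma pvIsPrefixOf_head {e a : Char} {cs t : List Char}
    (h : (e :: cs).isPrefixOf (a :: t) = true) : a = e := by
  rw [List.isPrefixOf_iff_prefix, List.cons_prefix_cons] at h
  exact h.1.symm

lemma pvRepPrefix (e : Char) (k r : Nat) (h : k ≤ r) :
    List.replicate k e <+: List.replicate r e :=
  ⟨List.replicate (r - k) e, by rw [← List.replicate_add]; congr 1; omega⟩

lemma pvGreedy_not_mem (e : Char) (cs new : List Char) :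
    ∀ l : List Char, e ∉ l → pvGreedy e cs new l = l := by
  intro l
  induction l with
  | nil => intro _; simp [pvGreedy]
  | cons a t ih =>
      intro h
      rw [pvGreedy]
      have ha : a ≠ e := fun hae => h (by simp [hae])
      have hp : ¬ ((e :: cs).isPrefixOf (a :: t) = true) := fun hp => ha (pvIsPrefixOf_head hp)
      simp only [hp, if_false, Bool.false_eq_true]
      rw [ih (fun ht => h (by simp [ht]))]

lemma pvGreedy_append_left (e : Char) (cs new : List Char) :
    ∀ a b : List Char, e ∉ a → pvGreedy e cs new (a ++ b) = a ++ pvGreedy e cs new b := by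
  intro a
  induction a with
  | nil => intro b _; simp
  | cons x t ih =>
      intro b h
      have hx : x ≠ e := fun hxe => h (by simp [hxe])
      rw [List.cons_append, pvGreedy]
      have hp : ¬ ((e :: cs).isPrefixOf (x :: (t ++ b)) = true) := fun hp => hx (pvIsPrefixOf_head hp)
      simp only [hp, if_false, Bool.false_eq_true]
      rw [ih b (fun ht => h (by simp [ht])), List.cons_append]

lemma pvG_append_left (e : Char) (k : Nat) (new : List Char) (a b : List Char) (h : e ∉ a) :
    pvG e k new (a ++ b) = a ++ pvG e k new b :=
  pvGreedy_append_left e _ new a b h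

lemma pvG_nil (e : Char) (k : Nat) (new : List Char) : pvG e k new [] = [] := by
  simp [pvG, pvGreedy]

-- unfolding pvG on a replicate-headed list: the two branch shapes
lemma pvG_step_le (e : Char) (k : Nat) (new : List Char) (hk : 1 ≤ k) (r : Nat) (b : List Char)
    (hkr : k ≤ r + 1) :
    pvG e k new (List.replicate (r + 1) e ++ b) =
      new ++ pvG e k new (List.replicate (r + 1 - k) e ++ b) := by
  have hrep : (e :: List.replicate (k - 1) e) = List.replicate k e := by
    rw [← List.replicate_succ]; congr 1; omega
  rw [pvG, List.replicate_succ, List.cons_append, pvGreedy]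
  have hpre : (e :: List.replicate (k - 1) e).isPrefixOf (e :: (List.replicate r e ++ b)) = true := by
    rw [List.isPrefixOf_iff_prefix, hrep, ← List.cons_append, ← List.replicate_succ]
    exact (pvRepPrefix e k (r + 1) hkr).trans (List.prefix_append _ _)
  simp only [hpre, if_true]
  congr 1
  rw [List.length_replicate, List.drop_append, List.drop_replicate, List.length_replicate]
  have h1 : k - 1 - r = 0 := by omega
  have h2 : r - (k - 1) = r + 1 - k := by omega
  rw [h1, h2, List.drop_zero]
  rfl

lemma pvG_step_lt (e : Char) (k : Nat) (new : List Char) (hk : 1 ≤ k) (r : Nat) (b : List Char)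
    (hkr : r + 1 < k) (hb : b.head? ≠ some e) :
    pvG e k new (List.replicate (r + 1) e ++ b) =
      e :: pvG e k new (List.replicate r e ++ b) := by
  have hrep : (e :: List.replicate (k - 1) e) = List.replicate k e := by
    rw [← List.replicate_succ]; congr 1; omega
  rw [pvG, List.replicate_succ, List.cons_append, pvGreedy]
  have hpre : ¬ ((e :: List.replicate (k - 1) e).isPrefixOf (e :: (List.replicate r e ++ b)) = true) := by
    intro hp
    rw [List.isPrefixOf_iff_prefix, hrep, ← List.cons_append, ← List.replicate_succ] at hp
    obtain ⟨w, hw⟩ := hp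
    have hd := congrArg (List.drop (r + 1)) hw
    rw [List.drop_append, List.drop_replicate, List.length_replicate,
      List.drop_append, List.drop_replicate, List.length_replicate] at hd
    simp only [Nat.sub_self, List.drop_zero, List.replicate_zero, List.nil_append] at hd
    have h2 : k - (r + 1) = (k - r - 2) + 1 := by omega
    rw [h2, List.replicate_succ] at hd
    apply hb
    rw [← hd]
    simp
  simp only [hpre, if_false, Bool.false_eq_true]
  rfl

lemma pvG_rep_all (e : Char) (new : List Char) (k : Nat) (hk : 1 ≤ k) :
    ∀ (r : Nat) (b : List Char), b.head? ≠ some e →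
      pvG e k new (List.replicate r e ++ b) =
        (List.replicate (r / k) new).flatten ++ List.replicate (r % k) e ++ pvG e k new b := by
  intro r
  induction r using Nat.strong_induction_on with
  | _ r ih =>
      intro b hb
      match r with
      | 0 => simp [Nat.zero_div, Nat.zero_mod]
      | Nat.succ s =>
          by_cases hks : k ≤ s + 1
          · rw [pvG_step_le e k new hk s b hks, ih (s + 1 - k) (by omega) b hb]
            have hdiv : (s + 1) / k = (s + 1 - k) / k + 1 := by
              rw [Nat.div_eq_sub_div (by omega) hks]
            have hmod : (s + 1) % k = (s + 1 - k) % k := by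
              rw [Nat.mod_eq_sub_mod hks]
            rw [hdiv, hmod, List.replicate_succ, List.flatten_cons]
            simp [List.append_assoc]
          · rw [pvG_step_lt e k new hk s b (by omega) hb, ih s (by omega) b hb]
            have hdiv1 : (s + 1) / k = 0 := Nat.div_eq_of_lt (by omega)
            have hdiv2 : s / k = 0 := Nat.div_eq_of_lt (by omega)
            have hmod1 : (s + 1) % k = s + 1 := Nat.mod_eq_of_lt (by omega)
            have hmod2 : s % k = s := Nat.mod_eq_of_lt (by omega)
            rw [hdiv1, hdiv2, hmod1, hmod2]
            simp [List.replicate_succ]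

lemma pvG_rep (e : Char) (new : List Char) (k : Nat) (hk : 1 ≤ k) (r : Nat) :
    pvG e k new (List.replicate r e) =
      (List.replicate (r / k) new).flatten ++ List.replicate (r % k) e := by
  have := pvG_rep_all e new k hk r [] (by simp)
  simpa [pvG_nil] using this

lemma pvG_append_rep (e : Char) (new : List Char) (k : Nat) (hk : 1 ≤ k) (r : Nat)
    (b : List Char) (hb : b.head? ≠ some e) :
    pvG e k new (List.replicate r e ++ b) =
      pvG e k new (List.replicate r e) ++ pvG e k new b := by
  rw [pvG_rep_all e new k hk r b hb, pvG_rep e new k hk r]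

lemma pvHead_ne (e : Char) (l : List Char) (h : e ∉ l) : l.head? ≠ some e := by
  cases l with
  | nil => simp
  | cons a t =>
      simp only [List.head?_cons, ne_eq, Option.some.injEq]
      rintro rfl
      exact h (by simp)

lemma pvG_flat (e : Char) (k : Nat) (new : List Char) (hk : 1 ≤ k) :
    ∀ ps : List (List Char),
      (∀ p ∈ ps, p ≠ []) →
      (∀ p ∈ ps, ∃ u r, p = u ++ List.replicate r e ∧ e ∉ u) →
      List.IsChain (fun p q => (e ∉ p) ∨ q.head? ≠ some e) ps →
      pvG e k new ps.flatten = (ps.map (pvG e k new)).flatten := by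
  intro ps
  induction ps with
  | nil => intro _ _ _; simp [pvG_nil]
  | cons p ps' ih =>
      intro hne hsh hch
      obtain ⟨u, r, hp, hu⟩ := hsh p (by simp)
      have hflat : (p :: ps').flatten = u ++ (List.replicate r e ++ ps'.flatten) := by
        simp [hp, List.append_assoc]
      rw [hflat, pvG_append_left e k new u _ hu]
      have hhead : ps'.flatten.head? ≠ some e ∨ r = 0 := by
        by_cases hr : r = 0
        · right; exact hr
        · left
          cases ps' with
          | nil => simp
          | cons q rest =>
              rcases (List.isChain_cons.mp hch).1 q rfl with hqe | hqh
              · exfalso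
                apply hqe
                rw [hp]
                exact List.mem_append_right u (by simp [List.mem_replicate]; omega)
              · have hqne : q ≠ [] := hne q (by simp)
                rw [List.flatten_cons]
                cases q with
                | nil => exact absurd rfl hqne
                | cons y ys => simpa using hqh
      have hmid : pvG e k new (List.replicate r e ++ ps'.flatten) =
          pvG e k new (List.replicate r e) ++ pvG e k new ps'.flatten := by
        rcases hhead with hh | hr0
        · exact pvG_append_rep e new k hk r _ hh
        · subst hr0; simp [pvG_nil]
      rw [hmid, ih (fun q hq => hne q (by simp [hq])) (fun q hq => hsh q (by simp [hq]))
        (List.isChain_cons.mp hch).2]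
      have hgp : pvG e k new p = u ++ pvG e k new (List.replicate r e) := by
        rw [hp, pvG_append_left e k new u _ hu]
      simp [hgp, List.append_assoc]

-- ===== runs =====
def pvRunsFrom (cur : Char) (cnt : Nat) : List Char → List (Char × Nat)
  | [] => [(cur, cnt)]
  | ch :: t => if ch = cur then pvRunsFrom cur (cnt + 1) t else (cur, cnt) :: pvRunsFrom ch 1 t

def pvRuns (s : List Char) : List (Char × Nat) :=
  match s with
  | [] => []
  | c :: t => pvRunsFrom c 1 t

lemma pvRunsFrom_flatten :
    ∀ (rest : List Char) (cur : Char) (cnt : Nat),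
      ((pvRunsFrom cur cnt rest).map (fun p => List.replicate p.2 p.1)).flatten =
        List.replicate cnt cur ++ rest := by
  intro rest
  induction rest with
  | nil => intro cur cnt; simp [pvRunsFrom]
  | cons ch t ih =>
      intro cur cnt
      rw [pvRunsFrom]
      by_cases h : ch = cur
      · subst h
        simp only [if_true]
        rw [ih, List.replicate_succ' (n := cnt)]
        simp
      · simp only [h, if_false]
        simp only [List.map_cons, List.flatten_cons]
        rw [ih]
        simp

lemma pvRunsFrom_pos :
    ∀ (rest : List Char) (cur : Char) (cnt : Nat), 1 ≤ cnt →
      ∀ p ∈ pvRunsFrom cur cnt rest, 1 ≤ p.2 := by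
  intro rest
  induction rest with
  | nil =>
      intro cur cnt h p hp
      simp only [pvRunsFrom, List.mem_singleton] at hp
      subst hp; exact h
  | cons ch t ih =>
      intro cur cnt h p hp
      rw [pvRunsFrom] at hp
      by_cases hc : ch = cur
      · simp only [hc, if_true] at hp
        exact ih cur (cnt + 1) (by omega) p hp
      · simp only [hc, if_false, List.mem_cons] at hp
        rcases hp with rfl | hp
        · exact h
        · exact ih ch 1 le_rfl p hp

lemma pvRunsFrom_head :
    ∀ (rest : List Char) (cur : Char) (cnt : Nat),
      ∃ m, (pvRunsFrom cur cnt rest).head? = some (cur, m) := by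
  intro rest
  induction rest with
  | nil => intro cur cnt; exact ⟨cnt, rfl⟩
  | cons ch t ih =>
      intro cur cnt
      rw [pvRunsFrom]
      by_cases hc : ch = cur
      · simp only [hc, if_true]; exact ih cur (cnt + 1)
      · exact ⟨cnt, by simp [hc]⟩

lemma pvRunsFrom_chain :
    ∀ (rest : List Char) (cur : Char) (cnt : Nat),
      List.IsChain (fun a b => a.1 ≠ b.1) (pvRunsFrom cur cnt rest) := by
  intro rest
  induction rest with
  | nil => intro cur cnt; exact List.isChain_singleton _
  | cons ch t ih =>
      intro cur cnt
      rw [pvRunsFrom]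
      by_cases hc : ch = cur
      · simp only [hc, if_true]; exact ih cur (cnt + 1)
      · simp only [hc, if_false]
        obtain ⟨m, hm⟩ := pvRunsFrom_head t ch 1
        refine List.isChain_cons.mpr ⟨?_, ih ch 1⟩
        intro y hy
        rw [hm] at hy
        simp only [Option.mem_def, Option.some.injEq] at hy
        subst hy
        simpa using (Ne.symm hc)

lemma pvRuns_flatten (s : List Char) :
    ((pvRuns s).map (fun p => List.replicate p.2 p.1)).flatten = s := by
  cases s with
  | nil => rfl
  | cons c t =>
      show ((pvRunsFrom c 1 t).map (fun p => List.replicate p.2 p.1)).flatten = c :: t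
      rw [pvRunsFrom_flatten]
      simp

lemma pvRuns_pos (s : List Char) : ∀ p ∈ pvRuns s, 1 ≤ p.2 := by
  cases s with
  | nil => intro p hp; simp [pvRuns] at hp
  | cons c t => exact pvRunsFrom_pos t c 1 le_rfl

lemma pvRuns_chain (s : List Char) : List.IsChain (fun a b => a.1 ≠ b.1) (pvRuns s) := by
  cases s with
  | nil => exact List.isChain_nil
  | cons c t => exact pvRunsFrom_chain t c 1

-- ===== piece shapes through A's five replace passes =====
def pvP1 (n : Nat) (c : Char) (m : Nat) : List Char :=
  if c = '1' then List.replicate (m / (3 * n)) '-' ++ List.replicate (m % (3 * n)) '1'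
  else List.replicate m c

def pvP2 (n : Nat) (c : Char) (m : Nat) : List Char :=
  if c = '1' then
    List.replicate (m / (3 * n)) '-' ++ List.replicate (m % (3 * n) / n) '.' ++
      List.replicate (m % (3 * n) % n) '1'
  else List.replicate m c

def pvP3 (n : Nat) (c : Char) (m : Nat) : List Char :=
  if c = '0' then List.replicate (2 * (m / (7 * n))) ' ' ++ List.replicate (m % (7 * n)) '0'
  else pvP2 n c m

def pvP4 (n : Nat) (c : Char) (m : Nat) : List Char :=
  if c = '0' then
    List.replicate (2 * (m / (7 * n))) ' ' ++ List.replicate (m % (7 * n) / (3 * n)) ' ' ++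
      List.replicate (m % (7 * n) % (3 * n)) '0'
  else pvP2 n c m

def pvP5 (n : Nat) (c : Char) (m : Nat) : List Char :=
  if c = '0' then
    List.replicate (2 * (m / (7 * n))) ' ' ++ List.replicate (m % (7 * n) / (3 * n)) ' ' ++
      List.replicate (m % (7 * n) % (3 * n) % n) '0'
  else pvP2 n c m

lemma pvFlatRep (n k : Nat) (e : Char) :
    (List.replicate n (List.replicate k e)).flatten = List.replicate (n * k) e := by
  induction n with
  | zero => simp
  | succ m ih =>
      rw [List.replicate_succ, List.flatten_cons, ih, ← List.replicate_add]
      congr 1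
      ring

lemma pvPyRepeat_rep (k : Nat) (e : Char) (n : Nat) :
    PySem.List.pyRepeat (List.replicate k e) ((n : Nat) : Int) = List.replicate (k * n) e := by
  rw [PySem.List.pyRepeat]
  simp only [Int.toNat_natCast]
  rw [pvFlatRep]
  congr 1
  ring

lemma pvFlat1 (q : Nat) (x : Char) : (List.replicate q ([x] : List Char)).flatten = List.replicate q x := by
  simp

lemma pvFlat2 (q : Nat) : (List.replicate q ([' ',' '] : List Char)).flatten = List.replicate (2 * q) ' ' := by
  rw [show ([' ',' '] : List Char) = List.replicate 2 ' ' from rfl, pvFlatRep]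
  congr 1
  ring

lemma pvFlatNil (q : Nat) : (List.replicate q ([] : List Char)).flatten = [] := by
  simp

-- containment / nonemptiness facts
lemma pvP0_not (e : Char) (c : Char) (m : Nat) (h : c ≠ e) : e ∉ List.replicate m c := by
  intro hm
  exact h (List.eq_of_mem_replicate hm).symm

lemma pvP1_not1 (n : Nat) (c : Char) (m : Nat) (h : c ≠ '1') : '1' ∉ pvP1 n c m := by
  rw [pvP1, if_neg h]
  exact pvP0_not '1' c m h

lemma pvP2_not0 (n : Nat) (c : Char) (m : Nat) (h : c ≠ '0') : '0' ∉ pvP2 n c m := by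
  rw [pvP2]
  by_cases hc : c = '1'
  · rw [if_pos hc]
    intro hm
    rcases List.mem_append.mp hm with hm' | hm'
    · rcases List.mem_append.mp hm' with hm'' | hm''
      · exact absurd (List.eq_of_mem_replicate hm'') (by decide)
      · exact absurd (List.eq_of_mem_replicate hm'') (by decide)
    · exact absurd (List.eq_of_mem_replicate hm') (by decide)
  · rw [if_neg hc]
    exact pvP0_not '0' c m h

lemma pvP3_not0 (n : Nat) (c : Char) (m : Nat) (h : c ≠ '0') : '0' ∉ pvP3 n c m := by
  rw [pvP3, if_neg h]; exact pvP2_not0 n c m h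

lemma pvP4_not0 (n : Nat) (c : Char) (m : Nat) (h : c ≠ '0') : '0' ∉ pvP4 n c m := by
  rw [pvP4, if_neg h]; exact pvP2_not0 n c m h

lemma pvP0_ne (c : Char) (m : Nat) (hm : 1 ≤ m) : List.replicate m c ≠ [] := by
  simp only [ne_eq, List.replicate_eq_nil_iff]
  omega

lemma pvP1_ne (n : Nat) (hn : 1 ≤ n) (c : Char) (m : Nat) (hm : 1 ≤ m) : pvP1 n c m ≠ [] := by
  rw [pvP1]
  split
  · intro hcon
    obtain ⟨ha, hb⟩ := List.append_eq_nil_iff.mp hcon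
    rw [List.replicate_eq_nil_iff] at ha hb
    have h1 := Nat.div_add_mod m (3 * n)
    rw [ha, hb] at h1
    omega
  · exact pvP0_ne c m hm

lemma pvP2_ne (n : Nat) (hn : 1 ≤ n) (c : Char) (m : Nat) (hm : 1 ≤ m) : pvP2 n c m ≠ [] := by
  rw [pvP2]
  split
  · intro hcon
    obtain ⟨hab, hc3⟩ := List.append_eq_nil_iff.mp hcon
    obtain ⟨ha, hb⟩ := List.append_eq_nil_iff.mp hab
    rw [List.replicate_eq_nil_iff] at ha hb hc3
    have h1 := Nat.div_add_mod m (3 * n)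
    have h2 := Nat.div_add_mod (m % (3 * n)) n
    rw [ha] at h1
    rw [hb, hc3] at h2
    omega
  · exact pvP0_ne c m hm

lemma pvP3_ne (n : Nat) (hn : 1 ≤ n) (c : Char) (m : Nat) (hm : 1 ≤ m) : pvP3 n c m ≠ [] := by
  rw [pvP3]
  split
  · intro hcon
    obtain ⟨ha, hb⟩ := List.append_eq_nil_iff.mp hcon
    rw [List.replicate_eq_nil_iff] at ha hb
    have hq : m / (7 * n) = 0 := by omega
    have h1 := Nat.div_add_mod m (7 * n)
    rw [hq, hb] at h1
    simp at h1
    omega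
  · exact pvP2_ne n hn c m hm

lemma pvP4_ne (n : Nat) (hn : 1 ≤ n) (c : Char) (m : Nat) (hm : 1 ≤ m) : pvP4 n c m ≠ [] := by
  rw [pvP4]
  split
  · intro hcon
    obtain ⟨hab, hc3⟩ := List.append_eq_nil_iff.mp hcon
    obtain ⟨ha, hb⟩ := List.append_eq_nil_iff.mp hab
    rw [List.replicate_eq_nil_iff] at ha hb hc3
    have hq : m / (7 * n) = 0 := by omega
    have h1 := Nat.div_add_mod m (7 * n)
    have h2 := Nat.div_add_mod (m % (7 * n)) (3 * n)
    rw [hq] at h1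
    rw [hb, hc3] at h2
    simp at h1 h2
    omega
  · exact pvP2_ne n hn c m hm

-- shapes: every stage piece is (something pattern-char-free) ++ (a replicate of the pattern char)
lemma pvP0_shape (e : Char) (c : Char) (m : Nat) :
    ∃ u r, List.replicate m c = u ++ List.replicate r e ∧ e ∉ u := by
  by_cases h : c = e
  · subst h; exact ⟨[], m, by simp, by simp⟩
  · exact ⟨List.replicate m c, 0, by simp, pvP0_not e c m h⟩

lemma pvP1_shape (n : Nat) (c : Char) (m : Nat) :
    ∃ u r, pvP1 n c m = u ++ List.replicate r '1' ∧ '1' ∉ u := by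
  rw [pvP1]
  split
  · exact ⟨List.replicate (m / (3 * n)) '-', m % (3 * n), rfl, pvP0_not '1' '-' _ (by decide)⟩
  · exact pvP0_shape '1' c m

lemma pvP2_shape (n : Nat) (c : Char) (m : Nat) :
    ∃ u r, pvP2 n c m = u ++ List.replicate r '0' ∧ '0' ∉ u := by
  by_cases h : c = '0'
  · subst h
    rw [pvP2, if_neg (by decide : ('0' : Char) ≠ '1')]
    exact ⟨[], m, by simp, by simp⟩
  · exact ⟨pvP2 n c m, 0, by simp, pvP2_not0 n c m h⟩

lemma pvP3_shape (n : Nat) (c : Char) (m : Nat) :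
    ∃ u r, pvP3 n c m = u ++ List.replicate r '0' ∧ '0' ∉ u := by
  rw [pvP3]
  split
  · exact ⟨List.replicate (2 * (m / (7 * n))) ' ', m % (7 * n), rfl, pvP0_not '0' ' ' _ (by decide)⟩
  · next h => exact ⟨pvP2 n c m, 0, by simp, pvP2_not0 n c m h⟩

lemma pvP4_shape (n : Nat) (c : Char) (m : Nat) :
    ∃ u r, pvP4 n c m = u ++ List.replicate r '0' ∧ '0' ∉ u := by
  rw [pvP4]
  split
  · refine ⟨List.replicate (2 * (m / (7 * n))) ' ' ++ List.replicate (m % (7 * n) / (3 * n)) ' ',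
      m % (7 * n) % (3 * n), by rw [List.append_assoc], ?_⟩
    intro hm
    rcases List.mem_append.mp hm with hm' | hm' <;>
      exact absurd (List.eq_of_mem_replicate hm') (by decide)
  · next h => exact ⟨pvP2 n c m, 0, by simp, pvP2_not0 n c m h⟩

-- ===== the five per-piece stage lemmas =====
lemma pvS1 (n : Nat) (hn : 1 ≤ n) (c : Char) (m : Nat) :
    pvG '1' (3 * n) ['-'] (List.replicate m c) = pvP1 n c m := by
  rw [pvP1]
  by_cases h : c = '1'
  · subst h
    rw [if_pos rfl, pvG_rep '1' ['-'] (3 * n) (by omega) m, pvFlat1]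
  · rw [if_neg h]
    exact pvGreedy_not_mem '1' _ ['-'] _ (pvP0_not '1' c m h)

lemma pvS2 (n : Nat) (hn : 1 ≤ n) (c : Char) (m : Nat) :
    pvG '1' n ['.'] (pvP1 n c m) = pvP2 n c m := by
  rw [pvP1, pvP2]
  by_cases h : c = '1'
  · rw [if_pos h, if_pos h]
    rw [pvG_append_left '1' n ['.'] _ _ (pvP0_not '1' '-' _ (by decide))]
    rw [pvG_rep '1' ['.'] n hn, pvFlat1, List.append_assoc]
  · rw [if_neg h, if_neg h]
    exact pvGreedy_not_mem '1' _ ['.'] _ (pvP0_not '1' c m h)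

lemma pvS3 (n : Nat) (hn : 1 ≤ n) (c : Char) (m : Nat) :
    pvG '0' (7 * n) [' ',' '] (pvP2 n c m) = pvP3 n c m := by
  rw [pvP3]
  by_cases h : c = '0'
  · rw [if_pos h]
    rw [pvP2, if_neg (by rw [h]; decide)]
    rw [h, pvG_rep '0' [' ',' '] (7 * n) (by omega) m, pvFlat2]
  · rw [if_neg h]
    exact pvGreedy_not_mem '0' _ [' ',' '] _ (pvP2_not0 n c m h)

lemma pvS4 (n : Nat) (hn : 1 ≤ n) (c : Char) (m : Nat) :
    pvG '0' (3 * n) [' '] (pvP3 n c m) = pvP4 n c m := by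
  rw [pvP3, pvP4]
  by_cases h : c = '0'
  · rw [if_pos h, if_pos h]
    rw [pvG_append_left '0' (3 * n) [' '] _ _ (pvP0_not '0' ' ' _ (by decide))]
    rw [pvG_rep '0' [' '] (3 * n) (by omega), pvFlat1, List.append_assoc]
  · rw [if_neg h, if_neg h]
    exact pvGreedy_not_mem '0' _ [' '] _ (pvP2_not0 n c m h)

lemma pvS5 (n : Nat) (hn : 1 ≤ n) (c : Char) (m : Nat) :
    pvG '0' n [] (pvP4 n c m) = pvP5 n c m := by
  rw [pvP4, pvP5]
  by_cases h : c = '0'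
  · rw [if_pos h, if_pos h]
    have hu : '0' ∉ List.replicate (2 * (m / (7 * n))) ' ' ++
        List.replicate (m % (7 * n) / (3 * n)) ' ' := by
      intro hm
      rcases List.mem_append.mp hm with hm' | hm' <;>
        exact absurd (List.eq_of_mem_replicate hm') (by decide)
    rw [pvG_append_left '0' n [] _ _ hu]
    rw [pvG_rep '0' [] n hn, pvFlatNil]
    simp
  · rw [if_neg h, if_neg h]
    exact pvGreedy_not_mem '0' _ [] _ (pvP2_not0 n c m h)

-- ===== generic per-stage lifting over the run decomposition =====
lemma pvStage (e : Char) (k : Nat) (new : List Char) (hk : 1 ≤ k) (RS : List (Char × Nat))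
    (P P' : Char → Nat → List Char)
    (hstep : ∀ c m, pvG e k new (P c m) = P' c m)
    (hne : ∀ c m, 1 ≤ m → P c m ≠ [])
    (hshape : ∀ c m, ∃ u r, P c m = u ++ List.replicate r e ∧ e ∉ u)
    (hnm : ∀ c m, c ≠ e → e ∉ P c m)
    (hpos : ∀ p ∈ RS, 1 ≤ p.2)
    (hch : List.IsChain (fun a b => a.1 ≠ b.1) RS) :
    pvG e k new ((RS.map (fun p => P p.1 p.2)).flatten) =
      (RS.map (fun p => P' p.1 p.2)).flatten := by
  rw [pvG_flat e k new hk (RS.map (fun p => P p.1 p.2))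
    (by intro p hp; obtain ⟨q, hq, rfl⟩ := List.mem_map.mp hp; exact hne q.1 q.2 (hpos q hq))
    (by intro p hp; obtain ⟨q, hq, rfl⟩ := List.mem_map.mp hp; exact hshape q.1 q.2)
    ?_]
  · rw [List.map_map]
    congr 1
    apply List.map_congr_left
    intro p _
    exact hstep p.1 p.2
  · rw [List.isChain_map]
    apply hch.imp
    intro a b hab
    by_cases ha : a.1 = e
    · right
      apply pvHead_ne
      exact hnm b.1 b.2 (fun hb => hab (by rw [ha, hb]))
    · left
      exact hnm a.1 a.2 ha

-- ===== the assembled pipeline (A's replace chain = per-run pieces) =====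
lemma pvPipeline (n : Nat) (hn : 1 ≤ n) (s : List Char) :
    PySem.Chars.replace
      (PySem.Chars.replace
        (PySem.Chars.replace
          (PySem.Chars.replace
            (PySem.Chars.replace s (PySem.List.pyRepeat ['1','1','1'] (n : Int)) ['-'])
            (PySem.List.pyRepeat ['1'] (n : Int)) ['.'])
          (PySem.List.pyRepeat ['0','0','0','0','0','0','0'] (n : Int)) [' ',' '])
        (PySem.List.pyRepeat ['0','0','0'] (n : Int)) [' '])
      (PySem.List.pyRepeat ['0'] (n : Int)) [] =
    ((pvRuns s).map (fun p => pvP5 n p.1 p.2)).flatten := by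
  rw [show PySem.List.pyRepeat ['1','1','1'] ((n : Nat) : Int) = List.replicate (3 * n) '1' from
      pvPyRepeat_rep 3 '1' n,
    show PySem.List.pyRepeat ['1'] ((n : Nat) : Int) = List.replicate (1 * n) '1' from
      pvPyRepeat_rep 1 '1' n,
    show PySem.List.pyRepeat ['0','0','0','0','0','0','0'] ((n : Nat) : Int) =
        List.replicate (7 * n) '0' from pvPyRepeat_rep 7 '0' n,
    show PySem.List.pyRepeat ['0','0','0'] ((n : Nat) : Int) = List.replicate (3 * n) '0' from
      pvPyRepeat_rep 3 '0' n,
    show PySem.List.pyRepeat ['0'] ((n : Nat) : Int) = List.replicate (1 * n) '0' from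
      pvPyRepeat_rep 1 '0' n]
  rw [show (1 : Nat) * n = n from one_mul n]
  rw [pvReplace_G '1' (3 * n) ['-'] s (by omega),
    pvReplace_G '1' n ['.'] _ hn,
    pvReplace_G '0' (7 * n) [' ',' '] _ (by omega),
    pvReplace_G '0' (3 * n) [' '] _ (by omega),
    pvReplace_G '0' n [] _ hn]
  conv_lhs => rw [← pvRuns_flatten s]
  rw [pvStage '1' (3 * n) ['-'] (by omega) (pvRuns s) _ (pvP1 n) (pvS1 n hn)
        (fun c m hm => pvP0_ne c m hm) (fun c m => pvP0_shape '1' c m)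
        (fun c m h => pvP0_not '1' c m h) (pvRuns_pos s) (pvRuns_chain s),
      pvStage '1' n ['.'] hn (pvRuns s) (pvP1 n) (pvP2 n) (pvS2 n hn)
        (pvP1_ne n hn) (pvP1_shape n) (fun c m h => pvP1_not1 n c m h)
        (pvRuns_pos s) (pvRuns_chain s),
      pvStage '0' (7 * n) [' ',' '] (by omega) (pvRuns s) (pvP2 n) (pvP3 n) (pvS3 n hn)
        (pvP2_ne n hn) (pvP2_shape n) (fun c m h => pvP2_not0 n c m h)
        (pvRuns_pos s) (pvRuns_chain s),
      pvStage '0' (3 * n) [' '] (by omega) (pvRuns s) (pvP3 n) (pvP4 n) (pvS4 n hn)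
        (pvP3_ne n hn) (pvP3_shape n) (fun c m h => pvP3_not0 n c m h)
        (pvRuns_pos s) (pvRuns_chain s),
      pvStage '0' n [] hn (pvRuns s) (pvP4 n) (pvP5 n) (pvS5 n hn)
        (pvP4_ne n hn) (pvP4_shape n) (fun c m h => pvP4_not0 n c m h)
        (pvRuns_pos s) (pvRuns_chain s)]

-- ===== B's side: the one-pass scanner =====
lemma pvScanGo_nil (n f : Nat) : pvScanGo n f [] = [] := by
  cases f <;> rfl

-- prefix of a run: the homogeneous pattern matches iff it fits inside the run
lemma pvPre_le (e : Char) (k m : Nat) (b : List Char) (hb : b.head? ≠ some e) :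
    (List.replicate k e).isPrefixOf (List.replicate m e ++ b) = true ↔ k ≤ m := by
  constructor
  · intro hp
    by_contra hlt
    push_neg at hlt
    rw [List.isPrefixOf_iff_prefix] at hp
    obtain ⟨w, hw⟩ := hp
    have hd := congrArg (List.drop m) hw
    rw [List.drop_append, List.drop_replicate, List.length_replicate,
      List.drop_append, List.drop_replicate, List.length_replicate] at hd
    simp only [Nat.sub_self, List.drop_zero, List.replicate_zero, List.nil_append] at hd
    have h2 : k - m = (k - m - 1) + 1 := by omega
    rw [h2, List.replicate_succ] at hd
    apply hb
    rw [← hd]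
    simp
  · intro hk
    rw [List.isPrefixOf_iff_prefix]
    exact (pvRepPrefix e k m hk).trans (List.prefix_append _ _)

-- a pattern of a different character never matches at a run head
lemma pvPre_ne (e c : Char) (k m : Nat) (b : List Char) (hk : 1 ≤ k) (hm : 1 ≤ m) (hec : e ≠ c) :
    ¬ ((List.replicate k e).isPrefixOf (List.replicate m c ++ b) = true) := by
  intro hp
  obtain ⟨k', rfl⟩ : ∃ k', k = k' + 1 := ⟨k - 1, by omega⟩
  obtain ⟨m', rfl⟩ : ∃ m', m = m' + 1 := ⟨m - 1, by omega⟩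
  rw [List.replicate_succ, List.replicate_succ, List.cons_append] at hp
  exact hec (pvIsPrefixOf_head hp).symm

lemma pvDrop_rep (e : Char) (k m : Nat) (b : List Char) (hk : k ≤ m) :
    (List.replicate m e ++ b).drop k = List.replicate (m - k) e ++ b := by
  rw [List.drop_append, List.drop_replicate, List.length_replicate]
  rw [show k - m = 0 from by omega, List.drop_zero]

-- fuel irrelevance: with a positive unit every step consumes input
lemma pvScan_irrel (n : Nat) (hn : 1 ≤ n) :
    ∀ (len f1 f2 : Nat) (l : List Char), l.length ≤ len → l.length ≤ f1 → l.length ≤ f2 →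
      pvScanGo n f1 l = pvScanGo n f2 l := by
  intro len
  induction len with
  | zero =>
      intro f1 f2 l h _ _
      have : l = [] := by cases l <;> simp_all
      subst this
      simp [pvScanGo_nil]
  | succ L ih =>
      intro f1 f2 l hlen h1 h2
      cases l with
      | nil => simp [pvScanGo_nil]
      | cons c t =>
          obtain ⟨g1, rfl⟩ : ∃ g, f1 = g + 1 := ⟨f1 - 1, by simp at h1; omega⟩
          obtain ⟨g2, rfl⟩ : ∃ g, f2 = g + 1 := ⟨f2 - 1, by simp at h2; omega⟩
          simp only [List.length_cons] at hlen h1 h2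
          simp only [pvScanGo]
          split_ifs with w1 w2 w3 w4 w5
          · have hk : 3 * n ≤ (c :: t).length := by
              have := (List.isPrefixOf_iff_prefix.mp w1).length_le
              simpa using this
            have hlen' : ((c :: t).drop (3 * n)).length = t.length + 1 - 3 * n := by simp
            congr 1
            apply ih
            all_goals (rw [hlen']; omega)
          · have hk : n ≤ (c :: t).length := by
              have := (List.isPrefixOf_iff_prefix.mp w2).length_le
              simpa using this
            have hlen' : ((c :: t).drop n).length = t.length + 1 - n := by simp
            congr 1
            apply ih
            all_goals (rw [hlen']; omega)
          · have hk : 7 * n ≤ (c :: t).length := by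
              have := (List.isPrefixOf_iff_prefix.mp w3).length_le
              simpa using this
            have hlen' : ((c :: t).drop (7 * n)).length = t.length + 1 - 7 * n := by simp
            congr 2
            apply ih
            all_goals (rw [hlen']; omega)
          · have hk : 3 * n ≤ (c :: t).length := by
              have := (List.isPrefixOf_iff_prefix.mp w4).length_le
              simpa using this
            have hlen' : ((c :: t).drop (3 * n)).length = t.length + 1 - 3 * n := by simp
            congr 1
            apply ih
            all_goals (rw [hlen']; omega)
          · have hk : n ≤ (c :: t).length := by
              have := (List.isPrefixOf_iff_prefix.mp w5).length_le
              simpa using this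
            have hlen' : ((c :: t).drop n).length = t.length + 1 - n := by simp
            apply ih
            all_goals (simp only [List.length_drop, List.length_cons]; omega)
          · congr 1
            apply ih <;> omega

-- run length at natural fuel, abbreviation for readability of the run lemmas
def pvScanL (n : Nat) (l : List Char) : List Char := pvScanGo n l.length l

lemma pvScanL_of (n : Nat) (hn : 1 ≤ n) (f : Nat) (l : List Char) (h : l.length ≤ f) :
    pvScanGo n f l = pvScanL n l :=
  pvScan_irrel n hn f f l.length l h h le_rfl

-- scanning a maximal '1'-run
lemma pvScan_run1 (n : Nat) (hn : 1 ≤ n) :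
    ∀ (m : Nat) (b : List Char), b.head? ≠ some '1' →
      pvScanL n (List.replicate m '1' ++ b) =
        (List.replicate (m / (3 * n)) '-' ++ List.replicate (m % (3 * n) / n) '.' ++
          List.replicate (m % (3 * n) % n) '1') ++ pvScanL n b := by
  intro m
  induction m using Nat.strong_induction_on with
  | _ m ih =>
      intro b hb
      match m with
      | 0 => simp [Nat.zero_div, Nat.zero_mod]
      | Nat.succ s =>
          have hcons : List.replicate (s + 1) '1' ++ b = '1' :: (List.replicate s '1' ++ b) := by
            rw [List.replicate_succ]; rfl
          have hL : (List.replicate (s + 1) '1' ++ b).length = (s + b.length) + 1 := by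
            simp; omega
          rw [pvScanL, hL, hcons]
          simp only [pvScanGo]
          by_cases h3 : 3 * n ≤ s + 1
          · have hc1 : (List.replicate (3 * n) '1').isPrefixOf ('1' :: (List.replicate s '1' ++ b)) = true := by
              rw [← hcons]; exact (pvPre_le '1' (3 * n) (s + 1) b hb).mpr h3
            rw [if_pos hc1, ← hcons, pvDrop_rep '1' (3 * n) (s + 1) b h3]
            rw [pvScanL_of n hn _ _ (by simp; omega)]
            rw [ih (s + 1 - 3 * n) (by omega) b hb]
            have hdiv : (s + 1) / (3 * n) = (s + 1 - 3 * n) / (3 * n) + 1 :=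
              Nat.div_eq_sub_div (by omega) h3
            have hmod : (s + 1) % (3 * n) = (s + 1 - 3 * n) % (3 * n) := Nat.mod_eq_sub_mod h3
            rw [hdiv, hmod, List.replicate_succ]
            simp [List.append_assoc]
          · have hc1 : ¬ ((List.replicate (3 * n) '1').isPrefixOf ('1' :: (List.replicate s '1' ++ b)) = true) := by
              rw [← hcons]
              intro h
              exact h3 ((pvPre_le '1' (3 * n) (s + 1) b hb).mp h)
            rw [if_neg hc1]
            by_cases hn1 : n ≤ s + 1
            · have hc2 : (List.replicate n '1').isPrefixOf ('1' :: (List.replicate s '1' ++ b)) = true := by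
                rw [← hcons]; exact (pvPre_le '1' n (s + 1) b hb).mpr hn1
              rw [if_pos hc2, ← hcons, pvDrop_rep '1' n (s + 1) b hn1]
              rw [pvScanL_of n hn _ _ (by simp; omega)]
              rw [ih (s + 1 - n) (by omega) b hb]
              have hlt3 : s + 1 - n < 3 * n := by omega
              have hd1 : (s + 1) / (3 * n) = 0 := Nat.div_eq_of_lt (by omega)
              have hm1 : (s + 1) % (3 * n) = s + 1 := Nat.mod_eq_of_lt (by omega)
              have hd2 : (s + 1 - n) / (3 * n) = 0 := Nat.div_eq_of_lt hlt3
              have hm2 : (s + 1 - n) % (3 * n) = s + 1 - n := Nat.mod_eq_of_lt hlt3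
              have hdn : (s + 1) / n = (s + 1 - n) / n + 1 := Nat.div_eq_sub_div (by omega) hn1
              have hmn : (s + 1) % n = (s + 1 - n) % n := Nat.mod_eq_sub_mod hn1
              rw [hd1, hm1, hd2, hm2, hdn, hmn, List.replicate_succ]
              simp [List.append_assoc]
            · have hc2 : ¬ ((List.replicate n '1').isPrefixOf ('1' :: (List.replicate s '1' ++ b)) = true) := by
                rw [← hcons]
                intro h
                exact hn1 ((pvPre_le '1' n (s + 1) b hb).mp h)
              rw [if_neg hc2]
              have hc3 : ¬ ((List.replicate (7 * n) '0').isPrefixOf ('1' :: (List.replicate s '1' ++ b)) = true) := by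
                rw [← hcons]
                exact pvPre_ne '0' '1' (7 * n) (s + 1) b (by omega) (by omega) (by decide)
              have hc4 : ¬ ((List.replicate (3 * n) '0').isPrefixOf ('1' :: (List.replicate s '1' ++ b)) = true) := by
                rw [← hcons]
                exact pvPre_ne '0' '1' (3 * n) (s + 1) b (by omega) (by omega) (by decide)
              have hc5 : ¬ ((List.replicate n '0').isPrefixOf ('1' :: (List.replicate s '1' ++ b)) = true) := by
                rw [← hcons]
                exact pvPre_ne '0' '1' n (s + 1) b hn (by omega) (by decide)
              rw [if_neg hc3, if_neg hc4, if_neg hc5]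
              rw [pvScanL_of n hn _ _ (by simp)]
              rw [ih s (by omega) b hb]
              have hd1 : (s + 1) / (3 * n) = 0 := Nat.div_eq_of_lt (by omega)
              have hm1 : (s + 1) % (3 * n) = s + 1 := Nat.mod_eq_of_lt (by omega)
              have hd2 : s / (3 * n) = 0 := Nat.div_eq_of_lt (by omega)
              have hm2 : s % (3 * n) = s := Nat.mod_eq_of_lt (by omega)
              have hdn1 : (s + 1) / n = 0 := Nat.div_eq_of_lt (by omega)
              have hmn1 : (s + 1) % n = s + 1 := Nat.mod_eq_of_lt (by omega)
              have hdn2 : s / n = 0 := Nat.div_eq_of_lt (by omega)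
              have hmn2 : s % n = s := Nat.mod_eq_of_lt (by omega)
              rw [hd1, hm1, hd2, hm2, hdn1, hmn1, hdn2, hmn2, List.replicate_succ]
              simp

-- scanning a maximal '0'-run
lemma pvScan_run0 (n : Nat) (hn : 1 ≤ n) :
    ∀ (m : Nat) (b : List Char), b.head? ≠ some '0' →
      pvScanL n (List.replicate m '0' ++ b) =
        (List.replicate (2 * (m / (7 * n))) ' ' ++ List.replicate (m % (7 * n) / (3 * n)) ' ' ++
          List.replicate (m % (7 * n) % (3 * n) % n) '0') ++ pvScanL n b := by
  intro m
  induction m using Nat.strong_induction_on with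
  | _ m ih =>
      intro b hb
      match m with
      | 0 => simp [Nat.zero_div, Nat.zero_mod]
      | Nat.succ s =>
          have hcons : List.replicate (s + 1) '0' ++ b = '0' :: (List.replicate s '0' ++ b) := by
            rw [List.replicate_succ]; rfl
          have hL : (List.replicate (s + 1) '0' ++ b).length = (s + b.length) + 1 := by
            simp; omega
          rw [pvScanL, hL, hcons]
          simp only [pvScanGo]
          have hc1 : ¬ ((List.replicate (3 * n) '1').isPrefixOf ('0' :: (List.replicate s '0' ++ b)) = true) := by
            rw [← hcons]
            exact pvPre_ne '1' '0' (3 * n) (s + 1) b (by omega) (by omega) (by decide)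
          have hc2 : ¬ ((List.replicate n '1').isPrefixOf ('0' :: (List.replicate s '0' ++ b)) = true) := by
            rw [← hcons]
            exact pvPre_ne '1' '0' n (s + 1) b hn (by omega) (by decide)
          rw [if_neg hc1, if_neg hc2]
          by_cases h7 : 7 * n ≤ s + 1
          · have hc3 : (List.replicate (7 * n) '0').isPrefixOf ('0' :: (List.replicate s '0' ++ b)) = true := by
              rw [← hcons]; exact (pvPre_le '0' (7 * n) (s + 1) b hb).mpr h7
            rw [if_pos hc3, ← hcons, pvDrop_rep '0' (7 * n) (s + 1) b h7]
            rw [pvScanL_of n hn _ _ (by simp; omega)]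
            rw [ih (s + 1 - 7 * n) (by omega) b hb]
            have hdiv : (s + 1) / (7 * n) = (s + 1 - 7 * n) / (7 * n) + 1 :=
              Nat.div_eq_sub_div (by omega) h7
            have hmod : (s + 1) % (7 * n) = (s + 1 - 7 * n) % (7 * n) := Nat.mod_eq_sub_mod h7
            rw [hdiv, hmod]
            rw [show 2 * ((s + 1 - 7 * n) / (7 * n) + 1) = (2 * ((s + 1 - 7 * n) / (7 * n)) + 1) + 1 from by ring]
            rw [List.replicate_succ, List.replicate_succ]
            simp [List.append_assoc]
          · have hc3 : ¬ ((List.replicate (7 * n) '0').isPrefixOf ('0' :: (List.replicate s '0' ++ b)) = true) := by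
              rw [← hcons]
              intro h
              exact h7 ((pvPre_le '0' (7 * n) (s + 1) b hb).mp h)
            rw [if_neg hc3]
            have hd7 : (s + 1) / (7 * n) = 0 := Nat.div_eq_of_lt (by omega)
            have hm7 : (s + 1) % (7 * n) = s + 1 := Nat.mod_eq_of_lt (by omega)
            by_cases h3 : 3 * n ≤ s + 1
            · have hc4 : (List.replicate (3 * n) '0').isPrefixOf ('0' :: (List.replicate s '0' ++ b)) = true := by
                rw [← hcons]; exact (pvPre_le '0' (3 * n) (s + 1) b hb).mpr h3
              rw [if_pos hc4, ← hcons, pvDrop_rep '0' (3 * n) (s + 1) b h3]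
              rw [pvScanL_of n hn _ _ (by simp; omega)]
              rw [ih (s + 1 - 3 * n) (by omega) b hb]
              have hlt7 : s + 1 - 3 * n < 7 * n := by omega
              have hd7' : (s + 1 - 3 * n) / (7 * n) = 0 := Nat.div_eq_of_lt hlt7
              have hm7' : (s + 1 - 3 * n) % (7 * n) = s + 1 - 3 * n := Nat.mod_eq_of_lt hlt7
              have hd3 : (s + 1) / (3 * n) = (s + 1 - 3 * n) / (3 * n) + 1 :=
                Nat.div_eq_sub_div (by omega) h3
              have hm3 : (s + 1) % (3 * n) = (s + 1 - 3 * n) % (3 * n) := Nat.mod_eq_sub_mod h3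
              rw [hd7, hm7, hd7', hm7', hd3, hm3, List.replicate_succ]
              simp [List.append_assoc]
            · have hc4 : ¬ ((List.replicate (3 * n) '0').isPrefixOf ('0' :: (List.replicate s '0' ++ b)) = true) := by
                rw [← hcons]
                intro h
                exact h3 ((pvPre_le '0' (3 * n) (s + 1) b hb).mp h)
              rw [if_neg hc4]
              have hd3 : (s + 1) / (3 * n) = 0 := Nat.div_eq_of_lt (by omega)
              have hm3 : (s + 1) % (3 * n) = s + 1 := Nat.mod_eq_of_lt (by omega)
              by_cases hn1 : n ≤ s + 1
              · have hc5 : (List.replicate n '0').isPrefixOf ('0' :: (List.replicate s '0' ++ b)) = true := by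
                  rw [← hcons]; exact (pvPre_le '0' n (s + 1) b hb).mpr hn1
                rw [if_pos hc5, ← hcons, pvDrop_rep '0' n (s + 1) b hn1]
                rw [pvScanL_of n hn _ _ (by simp; omega)]
                rw [ih (s + 1 - n) (by omega) b hb]
                have hlt7 : s + 1 - n < 7 * n := by omega
                have hlt3 : s + 1 - n < 3 * n := by omega
                have hd7' : (s + 1 - n) / (7 * n) = 0 := Nat.div_eq_of_lt hlt7
                have hm7' : (s + 1 - n) % (7 * n) = s + 1 - n := Nat.mod_eq_of_lt hlt7
                have hd3' : (s + 1 - n) / (3 * n) = 0 := Nat.div_eq_of_lt hlt3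
                have hm3' : (s + 1 - n) % (3 * n) = s + 1 - n := Nat.mod_eq_of_lt hlt3
                have hmn : (s + 1) % n = (s + 1 - n) % n := Nat.mod_eq_sub_mod hn1
                rw [hd7, hm7, hd3, hm3, hd7', hm7', hd3', hm3', hmn]
              · have hc5 : ¬ ((List.replicate n '0').isPrefixOf ('0' :: (List.replicate s '0' ++ b)) = true) := by
                  rw [← hcons]
                  intro h
                  exact hn1 ((pvPre_le '0' n (s + 1) b hb).mp h)
                rw [if_neg hc5]
                rw [pvScanL_of n hn _ _ (by simp)]
                rw [ih s (by omega) b hb]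
                have hd7' : s / (7 * n) = 0 := Nat.div_eq_of_lt (by omega)
                have hm7' : s % (7 * n) = s := Nat.mod_eq_of_lt (by omega)
                have hd3' : s / (3 * n) = 0 := Nat.div_eq_of_lt (by omega)
                have hm3' : s % (3 * n) = s := Nat.mod_eq_of_lt (by omega)
                have hmn1 : (s + 1) % n = s + 1 := Nat.mod_eq_of_lt (by omega)
                have hmn2 : s % n = s := Nat.mod_eq_of_lt (by omega)
                rw [hd7, hm7, hd3, hm3, hd7', hm7', hd3', hm3', hmn1, hmn2, List.replicate_succ]
                simp

-- scanning a run of any other character: nothing matches, every char is copied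
lemma pvScan_runO (n : Nat) (hn : 1 ≤ n) (c : Char) (hc1 : c ≠ '1') (hc0 : c ≠ '0') :
    ∀ (m : Nat) (b : List Char),
      pvScanL n (List.replicate m c ++ b) = List.replicate m c ++ pvScanL n b := by
  intro m
  induction m with
  | zero => simp
  | succ s ih =>
      intro b
      have hcons : List.replicate (s + 1) c ++ b = c :: (List.replicate s c ++ b) := by
        rw [List.replicate_succ]; rfl
      have hL : (List.replicate (s + 1) c ++ b).length = (s + b.length) + 1 := by
        simp; omega
      rw [pvScanL, hL, hcons]
      simp only [pvScanGo]
      have w1 : ¬ ((List.replicate (3 * n) '1').isPrefixOf (c :: (List.replicate s c ++ b)) = true) := by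
        rw [← hcons]
        exact pvPre_ne '1' c (3 * n) (s + 1) b (by omega) (by omega) (Ne.symm hc1)
      have w2 : ¬ ((List.replicate n '1').isPrefixOf (c :: (List.replicate s c ++ b)) = true) := by
        rw [← hcons]
        exact pvPre_ne '1' c n (s + 1) b hn (by omega) (Ne.symm hc1)
      have w3 : ¬ ((List.replicate (7 * n) '0').isPrefixOf (c :: (List.replicate s c ++ b)) = true) := by
        rw [← hcons]
        exact pvPre_ne '0' c (7 * n) (s + 1) b (by omega) (by omega) (Ne.symm hc0)
      have w4 : ¬ ((List.replicate (3 * n) '0').isPrefixOf (c :: (List.replicate s c ++ b)) = true) := by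
        rw [← hcons]
        exact pvPre_ne '0' c (3 * n) (s + 1) b (by omega) (by omega) (Ne.symm hc0)
      have w5 : ¬ ((List.replicate n '0').isPrefixOf (c :: (List.replicate s c ++ b)) = true) := by
        rw [← hcons]
        exact pvPre_ne '0' c n (s + 1) b hn (by omega) (Ne.symm hc0)
      rw [if_neg w1, if_neg w2, if_neg w3, if_neg w4, if_neg w5]
      rw [pvScanL_of n hn _ _ (by simp), ih b, List.replicate_succ]
      simp

-- the scanner over the whole run decomposition
lemma pvScan_flat (n : Nat) (hn : 1 ≤ n) :
    ∀ RS : List (Char × Nat), (∀ p ∈ RS, 1 ≤ p.2) → List.IsChain (fun a b => a.1 ≠ b.1) RS →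
      pvScanL n ((RS.map (fun p => List.replicate p.2 p.1)).flatten) =
        (RS.map (fun p => pvP5 n p.1 p.2)).flatten := by
  intro RS
  induction RS with
  | nil => intro _ _; simp [pvScanL, pvScanGo_nil]
  | cons p RS' ih =>
      intro hpos hch
      have hflat : ((p :: RS').map (fun p => List.replicate p.2 p.1)).flatten =
          List.replicate p.2 p.1 ++ (RS'.map (fun p => List.replicate p.2 p.1)).flatten := by
        simp
      rw [hflat]
      have hb : ((RS'.map (fun p => List.replicate p.2 p.1)).flatten).head? ≠ some p.1 := by
        cases RS' with
        | nil => simp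
        | cons q r =>
            have hne : p.1 ≠ q.1 := (List.isChain_cons.mp hch).1 q rfl
            have hq2 : 1 ≤ q.2 := hpos q (by simp)
            obtain ⟨s, hs⟩ : ∃ s, q.2 = s + 1 := ⟨q.2 - 1, by omega⟩
            simp only [List.map_cons, List.flatten_cons, hs, List.replicate_succ, List.cons_append,
              List.head?_cons, ne_eq, Option.some.injEq]
            exact fun h => hne h.symm
      have hrest := ih (fun q hq => hpos q (by simp [hq])) (List.isChain_cons.mp hch).2
      by_cases h1 : p.1 = '1'
      · rw [h1, pvScan_run1 n hn p.2 _ (by rw [← h1]; exact hb), hrest]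
        simp only [List.map_cons, List.flatten_cons]
        congr 1
        rw [pvP5, h1, if_neg (by decide : ('1' : Char) ≠ '0'), pvP2, if_pos rfl]
      · by_cases h0 : p.1 = '0'
        · rw [h0, pvScan_run0 n hn p.2 _ (by rw [← h0]; exact hb), hrest]
          simp only [List.map_cons, List.flatten_cons]
          congr 1
          rw [pvP5, h0, if_pos rfl]
        · rw [pvScan_runO n hn p.1 h1 h0 p.2 _, hrest]
          simp only [List.map_cons, List.flatten_cons]
          congr 1
          rw [pvP5, if_neg h0, pvP2, if_neg h1]

lemma pvScan_runs (n : Nat) (hn : 1 ≤ n) (s : List Char) :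
    pvScanGo n s.length s = ((pvRuns s).map (fun p => pvP5 n p.1 p.2)).flatten := by
  show pvScanL n s = _
  conv_lhs => rw [← pvRuns_flatten s]
  exact pvScan_flat n hn (pvRuns s) (pvRuns_pos s) (pvRuns_chain s)

-- ===== strip equivalence and ValueError-side facts =====
lemma pvStrip_eq (l : List Char) :
    PySem.Chars.stripChars l ['0'] = pvRstrip0 (pvLstrip0 l) := by
  have hf : (fun c => List.contains ['0'] c) = (fun c : Char => c == '0') := by
    funext c
    by_cases h : c = '0' <;> simp [h]
  simp only [PySem.Chars.stripChars, pvRstrip0, pvLstrip0]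
  rw [hf]

lemma pvSplitGo_acc (d : Char) :
    ∀ (fuel : Nat) (l cur : List Char) (acc : List (List Char)) (p : List Char), p ∈ acc →
      p ∈ PySem.Chars.splitOn.go [d] fuel l cur acc := by
  intro fuel
  induction fuel with
  | zero =>
      intro l cur acc p hp
      rw [PySem.Chars.splitOn.go]
      simp [hp]
  | succ f ih =>
      intro l cur acc p hp
      cases l with
      | nil =>
          rw [PySem.Chars.splitOn.go]
          · simp [hp]
          · omega
      | cons c rest =>
          rw [PySem.Chars.splitOn.go]
          by_cases hc : ([d] : List Char).isPrefixOf (c :: rest) = true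
          · simp only [hc, if_true]
            exact ih _ _ _ p (by simp [hp])
          · simp only [hc, if_false, Bool.false_eq_true]
            exact ih _ _ _ p hp

lemma pvSplitGo_mem (d : Char) :
    ∀ (fuel : Nat) (l cur : List Char) (acc : List (List Char)) (x : Char), l.length ≤ fuel →
      (x ∈ cur ∨ (x ∈ l ∧ x ≠ d)) →
      ∃ p ∈ PySem.Chars.splitOn.go [d] fuel l cur acc, x ∈ p := by
  intro fuel
  induction fuel with
  | zero =>
      intro l cur acc x h hx
      have hl : l = [] := by cases l <;> simp_all
      subst hl
      rw [PySem.Chars.splitOn.go]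
      rcases hx with hx | hx
      · exact ⟨cur.reverse ++ [], by simp, by simp [hx]⟩
      · simp at hx
  | succ f ih =>
      intro l cur acc x h hx
      cases l with
      | nil =>
          rw [PySem.Chars.splitOn.go]
          · rcases hx with hx | hx
            · exact ⟨cur.reverse, by simp, by simp [hx]⟩
            · simp at hx
          · omega
      | cons c rest =>
          rw [PySem.Chars.splitOn.go]
          simp only [List.length_cons] at h
          by_cases hc : ([d] : List Char).isPrefixOf (c :: rest) = true
          · have hcd : c = d := by
              rw [List.isPrefixOf_iff_prefix, List.cons_prefix_cons] at hc
              exact hc.1.symm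
            simp only [hc, if_true]
            rcases hx with hx | ⟨hxl, hxd⟩
            · refine ⟨cur.reverse, pvSplitGo_acc d f _ _ _ _ (by simp), by simp [hx]⟩
            · have hxrest : x ∈ rest := by
                rcases List.mem_cons.mp hxl with rfl | hr
                · exact absurd hcd hxd
                · exact hr
              exact ih _ _ _ x (by simpa using by omega) (Or.inr ⟨by simpa using hxrest, hxd⟩)
          · simp only [hc, if_false, Bool.false_eq_true]
            rcases hx with hx | ⟨hxl, hxd⟩
            · exact ih _ _ _ x (by omega) (Or.inl (by simp [hx]))
            · rcases List.mem_cons.mp hxl with rfl | hr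
              · exact ih _ _ _ x (by omega) (Or.inl (by simp))
              · exact ih _ _ _ x (by omega) (Or.inr ⟨hr, hxd⟩)

lemma pvSplit_exists (d : Char) (s : List Char) (x : Char) (hx : x ∈ s) (hd : x ≠ d) :
    ∃ p ∈ PySem.Chars.splitOn s [d], p ≠ [] := by
  obtain ⟨p, hp, hxp⟩ := pvSplitGo_mem d (s.length + 1) s [] [] x (by omega) (Or.inr ⟨hx, hd⟩)
  refine ⟨p, ?_, ?_⟩
  · rw [PySem.Chars.splitOn]
    exact hp
  · rintro rfl
    simp at hxp

lemma pvMem_drop0 (x : Char) :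
    ∀ l : List Char, x ∈ l → x ≠ '0' → x ∈ List.dropWhile (fun c => c == '0') l := by
  intro l
  induction l with
  | nil => intro h _; simp at h
  | cons a t ih =>
      intro hx h0
      rw [List.dropWhile_cons]
      by_cases ha : a = '0'
      · subst ha
        simp only [beq_self_eq_true, if_true]
        rcases List.mem_cons.mp hx with rfl | ht
        · exact absurd rfl h0
        · exact ih ht h0
      · simp [ha, hx]

lemma pvMem_strip (x : Char) (l : List Char) (hx : x ∈ l) (h0 : x ≠ '0') :
    x ∈ pvRstrip0 (pvLstrip0 l) := by
  rw [pvRstrip0, pvLstrip0, List.mem_reverse]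
  apply pvMem_drop0 x _ _ h0
  rw [List.mem_reverse]
  exact pvMem_drop0 x l hx h0

-- ===== VERDICT (by name: the statement is the Claim_ definition above) =====
theorem morse_bits_spec : Claim_equal_morse_bits := by
  intro bits _ hpre
  rw [Pre_morse_bits, List.any_eq_true] at hpre
  show morse_bits bits = morse_bits_alt bits
  unfold morse_bits morse_bits_alt
  simp only [pvStrip_eq]
  obtain ⟨x, hxmem, hx0'⟩ := hpre
  have hx0 : x ≠ '0' := of_decide_eq_true hx0'
  obtain ⟨p, hpmem, hpne⟩ :=
    pvSplit_exists '0' (pvRstrip0 (pvLstrip0 bits.toList)) x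
      (pvMem_strip x bits.toList hxmem hx0) hx0
  have hlens : p.length ∈ ((PySem.Chars.splitOn (pvRstrip0 (pvLstrip0 bits.toList)) ['1'] ++
      PySem.Chars.splitOn (pvRstrip0 (pvLstrip0 bits.toList)) ['0']).filter
      (fun i => !i.isEmpty)).map List.length := by
    apply List.mem_map.mpr
    refine ⟨p, List.mem_filter.mpr ⟨List.mem_append_right _ hpmem, ?_⟩, rfl⟩
    simpa [List.isEmpty_iff] using hpne
  cases hmin : PySem.List.min? (((PySem.Chars.splitOn (pvRstrip0 (pvLstrip0 bits.toList)) ['1'] ++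
      PySem.Chars.splitOn (pvRstrip0 (pvLstrip0 bits.toList)) ['0']).filter
      (fun i => !i.isEmpty)).map List.length) (fun x => x) with
  | none =>
      exact absurd hlens (by rw [PySem.List.min?_eq_none_iff] at hmin; rw [hmin]; simp)
  | some n =>
      have hn : 1 ≤ n := by
        have hmem := PySem.List.min?_mem hmin
        obtain ⟨q, hq, hqlen⟩ := List.mem_map.mp hmem
        have hqne := (List.mem_filter.mp hq).2
        simp only [Bool.not_eq_true', List.isEmpty_eq_false_iff] at hqne
        rw [← hqlen]
        cases q with
        | nil => exact absurd rfl hqne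
        | cons _ _ => simp
      simp only [pvPipeline n hn (pvRstrip0 (pvLstrip0 bits.toList)),
        pvScan_runs n hn (pvRstrip0 (pvLstrip0 bits.toList))]
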